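-- pv_equiv track=rewrite | github.com/LordMhri/python-practices | countEvenConsonants.py | countEvenConsonant
-- ===== SOURCE A (Python) =====
-- def countEvenConsonant(s,k):
--     vowel = {"a","e","i","o","u"}
--     ans = 0
--     curr = 0
--     left = 0
--     for right in range(len(s)):
--         if s[right] not in vowel:
--             curr += 1
--         if right-left+1 == k:
--             if curr % 2 == 0:
--                 ans += 1
--             if s[left] not in vowel:
--                 curr -= 1
--
--             left += 1
--
--     return ans
-- ===== SOURCE B (Python) =====
-- def countEvenConsonant(s, k):
--     # prefix-sum table of consonant counts, then query each window
--     n = len(s)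
--     if k <= 0 or k > n:
--         return 0
--     P = [0]
--     t = 0
--     for c in s:
--         t += c not in "aeiou"
--         P.append(t)
--     ans = 0
--     for i in range(n - k + 1):
--         if (P[i + k] - P[i]) % 2 == 0:
--             ans += 1
--     return ans
-- ===== Notes on version B (the rewrite author's own statement) =====
-- stated objective: alternative
-- what changed: Replaced the incremental sliding-window loop (maintaining a running consonant count and a left pointer) by a prefix-sum table of consonant counts built in one pass and then queried once per window position.
import Mathlib
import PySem

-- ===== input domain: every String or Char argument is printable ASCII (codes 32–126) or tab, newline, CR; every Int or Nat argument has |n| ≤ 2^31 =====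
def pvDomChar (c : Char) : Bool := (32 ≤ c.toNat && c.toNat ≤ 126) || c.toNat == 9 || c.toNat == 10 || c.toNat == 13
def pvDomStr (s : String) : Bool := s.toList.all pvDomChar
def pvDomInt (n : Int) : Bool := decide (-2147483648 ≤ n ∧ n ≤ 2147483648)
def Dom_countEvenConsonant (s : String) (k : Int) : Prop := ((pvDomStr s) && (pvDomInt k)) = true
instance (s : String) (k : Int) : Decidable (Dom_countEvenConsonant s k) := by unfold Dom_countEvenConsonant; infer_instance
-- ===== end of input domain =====

-- B replaces A's incremental sliding-window loop by a prefix-sum table of consonant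
-- counts queried once per window position (alternative decomposition, same O(n) cost).

-- ===== PORT A =====
def pvVowel (c : Char) : Bool := c == 'a' || c == 'e' || c == 'i' || c == 'o' || c == 'u'

-- 's[left] not in vowel': left is always in range here in A, so the none branch is unreachable
def pvIsCons (cs : List Char) (i : Int) : Bool :=
  match PySem.List.pyGet? cs i with
  | some cl => !pvVowel cl
  | none => false

-- the 'for right in range(len(s))' loop of A: structural recursion over the remaining
-- characters, carrying right (index of the current char) and the state (ans, curr, left)
def pvLoopA (cs : List Char) (k : Int) : List Char → Int → Int × Int × Int → Int × Int × Int
  | [], _, st => st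
  | c :: rest, right, (ans, curr, left) =>
      let curr := if !pvVowel c then curr + 1 else curr
      let st :=
        if right - left + 1 = k then
          let ans := if PySem.Int.mod curr 2 = 0 then ans + 1 else ans
          let curr := if pvIsCons cs left then curr - 1 else curr
          (ans, curr, left + 1)
        else (ans, curr, left)
      pvLoopA cs k rest (right + 1) st

def countEvenConsonant (s : String) (k : Int) : Int :=
  (pvLoopA s.toList k s.toList 0 (0, 0, 0)).1

-- ===== PORT B =====
def countEvenConsonant_alt (s : String) (k : Int) : Int :=
  let cs := s.toList
  let n : Int := cs.length
  if k ≤ 0 ∨ n < k then 0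
  else
    -- P = [0]; t = 0; for c in s: t += c not in "aeiou"; P.append(t)
    let pt := cs.foldl (fun (acc : List Int × Int) c =>
        (acc.1 ++ [acc.2 + (if !pvVowel c then 1 else 0)],
         acc.2 + (if !pvVowel c then 1 else 0))) ([0], 0)
    let P := pt.1
    -- P[i+k], P[i]: here 0 ≤ i ≤ i+k ≤ n < len(P), so the default of pyGetD is never used
    (PySem.List.pyRange 0 (n - k + 1) 1).foldl
      (fun ans i =>
        if PySem.Int.mod (PySem.List.pyGetD P (i + k) 0 - PySem.List.pyGetD P i 0) 2 = 0
        then ans + 1 else ans) 0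

-- ===== PRECONDITION & SPEC =====
def Spec_countEvenConsonant (s : String) (k : Int) (out : Int) : Prop := out = countEvenConsonant_alt s k
instance (s : String) (k : Int) (out : Int) : Decidable (Spec_countEvenConsonant s k out) := by unfold Spec_countEvenConsonant; infer_instance

-- ===== CLAIM (what is proved, stated in full; the proofs are below) =====
def Claim_equal_countEvenConsonant : Prop := ∀ (s : String) (k : Int), Dom_countEvenConsonant s k → Spec_countEvenConsonant s k (countEvenConsonant s k)

-- ===== LEMMAS AND PROOFS =====

-- consonant count of a character list, as an Int
def pvCnt (l : List Char) : Int := (l.countP (fun c => !pvVowel c) : Int)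

theorem pvCnt_cons (c : Char) (l : List Char) :
    pvCnt (c :: l) = (if !pvVowel c then 1 else 0) + pvCnt l := by
  simp only [pvCnt, List.countP_cons]
  push_cast
  split <;> omega

theorem pvCnt_append (l₁ l₂ : List Char) : pvCnt (l₁ ++ l₂) = pvCnt l₁ + pvCnt l₂ := by
  simp [pvCnt, List.countP_append]

-- the intended prefix table: [cnt(cs[:0]), cnt(cs[:1]), …, cnt(cs[:n])]
def pvPspec (cs : List Char) : List Int :=
  (List.range (cs.length + 1)).map (fun i => pvCnt (cs.take i))

theorem pvBuildP (l : List Char) : ∀ (p : List Int) (t : Int),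
    List.foldl (fun (acc : List Int × Int) c =>
        (acc.1 ++ [acc.2 + (if !pvVowel c then 1 else 0)],
         acc.2 + (if !pvVowel c then 1 else 0))) (p, t) l
      = (p ++ (List.range l.length).map (fun i => t + pvCnt (l.take (i + 1))), t + pvCnt l) := by
  induction l with
  | nil => intro p t; simp [pvCnt]
  | cons c l ih =>
      intro p t
      rw [List.foldl_cons, ih]
      rw [Prod.mk.injEq]
      refine ⟨?_, by rw [pvCnt_cons]; ring⟩
      rw [List.length_cons, List.range_succ_eq_map]
      simp only [List.map_cons, List.map_map, List.append_assoc, List.singleton_append]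
      congr 1
      congr 1
      · simp [List.take_succ_cons, pvCnt]
      · refine List.map_congr_left (fun i _ => ?_)
        simp only [Function.comp_apply, Nat.succ_eq_add_one, List.take_succ_cons, pvCnt_cons]
        ring

theorem pvPspec_eq (cs : List Char) :
    [(0:Int)] ++ (List.range cs.length).map (fun i => (0:Int) + pvCnt (cs.take (i + 1))) = pvPspec cs := by
  rw [pvPspec, List.range_succ_eq_map]
  simp only [List.map_cons, List.map_map, List.singleton_append, List.take_zero]
  rw [List.cons.injEq]
  refine ⟨by simp [pvCnt], List.map_congr_left (fun i _ => ?_)⟩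
  simp [Function.comp, Nat.succ_eq_add_one]

theorem pvPspec_get (cs : List Char) (j : Nat) (hj : j ≤ cs.length) :
    PySem.List.pyGetD (pvPspec cs) ((j : Int)) 0 = pvCnt (cs.take j) := by
  rw [PySem.List.pyGetD_natCast, pvPspec, List.getD_eq_getElem?_getD, List.getElem?_map,
      List.getElem?_range (by omega)]
  simp

-- consonant count of the window [i, i+m) from prefix counts
theorem pvWindow (cs : List Char) (i m : Nat) :
    pvCnt (cs.take (i + m)) - pvCnt (cs.take i) = pvCnt ((cs.drop i).take m) := by
  rw [List.take_add, pvCnt_append]; ring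

theorem pvIsCons_eq (cs : List Char) (i : Nat) (h : i < cs.length) :
    pvIsCons cs (i : Int) = !pvVowel cs[i] := by
  rw [pvIsCons, PySem.List.pyGet?_natCast, List.getElem?_eq_getElem h]

-- A's loop state after r characters have been processed
def pvState (cs : List Char) (k : Int) (r : Nat) : Int × Int × Int :=
  if 1 ≤ k ∧ k ≤ (r : Int) then
    ((((List.range (r + 1 - k.toNat)).countP
        (fun i => decide (PySem.Int.mod (pvCnt ((cs.drop i).take k.toNat)) 2 = 0)) : Nat) : Int),
     pvCnt ((cs.take r).drop (r + 1 - k.toNat)),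
     (r : Int) + 1 - k)
  else (0, pvCnt (cs.take r), 0)

-- one iteration of A's loop body, as a function of the state
def pvStepFn (cs : List Char) (k : Int) (c : Char) (right : Int) (st : Int × Int × Int) : Int × Int × Int :=
  let ans := st.1
  let curr0 := st.2.1
  let left := st.2.2
  let curr := if !pvVowel c then curr0 + 1 else curr0
  if right - left + 1 = k then
    (if PySem.Int.mod curr 2 = 0 then ans + 1 else ans,
     if pvIsCons cs left then curr - 1 else curr,
     left + 1)
  else (ans, curr, left)

theorem pvLoopA_cons (cs : List Char) (k : Int) (c : Char) (rest : List Char) (right : Int)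
    (st : Int × Int × Int) :
    pvLoopA cs k (c :: rest) right st = pvLoopA cs k rest (right + 1) (pvStepFn cs k c right st) := by
  obtain ⟨ans, curr, left⟩ := st
  rfl

theorem pvStep (pre rest : List Char) (c : Char) (k : Int) :
    pvStepFn (pre ++ c :: rest) k c (pre.length : Int) (pvState (pre ++ c :: rest) k pre.length)
      = pvState (pre ++ c :: rest) k (pre.length + 1) := by
  set cs := pre ++ c :: rest with hcs
  set r := pre.length with hr
  have hrlen : r < cs.length := by simp [hcs, hr]
  have htake : cs.take r = pre := by
    rw [hcs, hr, List.take_append_of_le_length (le_refl _), List.take_length]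
  have htake1 : cs.take (r + 1) = pre ++ [c] := by
    have h1 : cs = (pre ++ [c]) ++ rest := by simp [hcs]
    have h2 : r + 1 = (pre ++ [c]).length := by simp [hr]
    rw [h1, h2, List.take_append_of_le_length (le_refl _), List.take_length]
  by_cases hk : 1 ≤ k ∧ k ≤ (r : Int) + 1
  · -- the window condition fires at this step
    obtain ⟨hk1, hkr⟩ := hk
    have hkint : k = (k.toNat : Int) := by omega
    have hkk1 : 1 ≤ k.toNat := by omega
    have hkkr : k.toNat ≤ r + 1 := by omega
    set i0 := r + 1 - k.toNat with hi0
    have hi0r : i0 ≤ r := by omega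
    have hi0lt : i0 < cs.length := by omega
    have hileft : (r : Int) + 1 - k = (i0 : Int) := by omega
    -- the state before this step, in phase-2 normal form (for k = r+1 the else branch coincides)
    have hstate : pvState cs k r
        = ((((List.range i0).countP
              (fun i => decide (PySem.Int.mod (pvCnt ((cs.drop i).take k.toNat)) 2 = 0)) : Nat) : Int),
           pvCnt ((cs.take r).drop i0),
           (i0 : Int)) := by
      rw [pvState]
      by_cases h2 : k ≤ (r : Int)
      · rw [if_pos ⟨hk1, h2⟩, hileft]
      · have hkeq : k = (r : Int) + 1 := by omega
        have hi00 : i0 = 0 := by omega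
        rw [if_neg (by omega), hi00]
        simp
    rw [hstate, pvState, if_pos ⟨hk1, by push_cast; omega⟩]
    -- the extended window and its decomposition
    have hext : (cs.take (r + 1)).drop i0 = (cs.take r).drop i0 ++ [c] := by
      rw [htake1, htake, List.drop_append_of_le_length (by omega)]
    have hcurr' : (if !pvVowel c then pvCnt ((cs.take r).drop i0) + 1 else pvCnt ((cs.take r).drop i0))
        = pvCnt ((cs.take (r + 1)).drop i0) := by
      rw [hext, pvCnt_append]
      by_cases hv : pvVowel c <;> simp [pvCnt, hv]
    have hwin2 : (cs.take (r + 1)).drop i0 = (cs.drop i0).take k.toNat := by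
      rw [List.drop_take, show r + 1 - i0 = k.toNat from by omega]
    have hwin : (cs.take (r + 1)).drop i0 = cs[i0] :: (cs.take (r + 1)).drop (i0 + 1) := by
      rw [List.drop_eq_getElem_cons (by simp [hr]; omega)]
      congr 1
      simp [List.getElem_take]
    have hsucc : r + 1 + 1 - k.toNat = i0 + 1 := by omega
    simp only [pvStepFn]
    rw [if_pos (show (r : Int) - (i0 : Int) + 1 = k from by omega)]
    rw [hcurr', hsucc, Prod.mk.injEq, Prod.mk.injEq]
    refine ⟨?_, ?_, by push_cast; omega⟩
    · -- the answer gains the window starting at i0 iff its consonant count is even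
      rw [List.range_succ, List.countP_append]
      have hsingle : (List.countP
          (fun i => decide (PySem.Int.mod (pvCnt ((cs.drop i).take k.toNat)) 2 = 0)) [i0] : Nat)
          = if PySem.Int.mod (pvCnt ((cs.take (r + 1)).drop i0)) 2 = 0 then 1 else 0 := by
        rw [hwin2]
        simp [List.countP_cons]
      rw [hsingle]
      by_cases hm : PySem.Int.mod (pvCnt ((cs.take (r + 1)).drop i0)) 2 = 0 <;>
        simp [hm] <;> push_cast <;> omega
    · -- removing the left character of the extended window
      rw [pvIsCons_eq cs i0 hi0lt]
      have hW : pvCnt ((cs.take (r + 1)).drop i0)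
          = (if !pvVowel cs[i0] then 1 else 0) + pvCnt ((cs.take (r + 1)).drop (i0 + 1)) := by
        rw [hwin, pvCnt_cons]
      by_cases hv : pvVowel cs[i0] <;> simp [hv] at hW ⊢ <;> omega
  · -- the window condition does not fire; both states are in phase 1
    have hne : ¬((r : Int) - 0 + 1 = k) := by omega
    have h1 : ¬(1 ≤ k ∧ k ≤ (r : Int)) := by omega
    have h2 : ¬(1 ≤ k ∧ k ≤ ((r + 1 : Nat) : Int)) := by push_cast; omega
    simp only [pvState, if_neg h1, if_neg h2, pvStepFn, if_neg hne]
    rw [Prod.mk.injEq, Prod.mk.injEq]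
    refine ⟨rfl, ?_, rfl⟩
    have hext : cs.take (r + 1) = cs.take r ++ [c] := by rw [htake1, htake]
    rw [hext, pvCnt_append]
    by_cases hv : pvVowel c <;> simp [pvCnt, hv]

theorem pvLoopA_inv (k : Int) : ∀ (rest pre : List Char),
    pvLoopA (pre ++ rest) k rest (pre.length : Int) (pvState (pre ++ rest) k pre.length)
      = pvState (pre ++ rest) k (pre.length + rest.length) := by
  intro rest
  induction rest with
  | nil => intro pre; simp [pvLoopA]
  | cons c rest ih =>
      intro pre
      rw [pvLoopA_cons, pvStep]
      have h := ih (pre ++ [c])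
      simp only [List.append_assoc, List.singleton_append, List.length_append,
        List.length_singleton] at h
      rw [show pre.length + (c :: rest).length = pre.length + 1 + rest.length from by
            simp; omega]
      rw [show ((pre.length : Int) + 1) = ((pre.length + 1 : Nat) : Int) from by push_cast; ring]
      exact h

-- ===== VERDICT (by name: the statement is the Claim_ definition above) =====
theorem countEvenConsonant_spec : Claim_equal_countEvenConsonant := by
  unfold Claim_equal_countEvenConsonant Spec_countEvenConsonant
  intro s k _
  set cs := s.toList with hcs
  set n := cs.length with hn
  -- A's value is the final loop state
  have hA : countEvenConsonant s k = (pvState cs k n).1 := by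
    have h := pvLoopA_inv k cs []
    have h0 : pvState cs k 0 = (0, 0, 0) := by
      rw [pvState, if_neg (by omega)]
      simp [pvCnt]
    simp only [List.nil_append, List.length_nil, Nat.cast_zero, zero_add] at h
    rw [countEvenConsonant, ← hcs, ← h0, h, hn]
  rw [hA]
  -- B's value
  rw [countEvenConsonant_alt, ← hcs]
  by_cases hk : k ≤ 0 ∨ ((n : Int) : Int) < k
  · rw [if_pos (by push_cast at hk ⊢; exact hk)]
    rw [pvState, if_neg (by omega)]
  · push_neg at hk
    obtain ⟨hk0, hkn⟩ := hk
    have hkint : k = (k.toNat : Int) := by omega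
    have hkk1 : 1 ≤ k.toNat := by omega
    have hkkn : k.toNat ≤ n := by omega
    rw [if_neg (by push_neg; exact ⟨hk0, hkn⟩)]
    simp only []
    rw [pvBuildP]
    simp only []
    rw [pvPspec_eq]
    rw [PySem.List.pyRange_one, List.foldl_map]
    rw [PySem.List.foldl_ite_add_one
      (p := fun j : Nat => PySem.Int.mod
        (PySem.List.pyGetD (pvPspec cs) ((0 + (j : Int)) + k) 0
          - PySem.List.pyGetD (pvPspec cs) (0 + (j : Int)) 0) 2 = 0)]
    rw [pvState, if_pos ⟨by omega, by omega⟩]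
    simp only [zero_add]
    have hM : ((n : Int) - k + 1 - 0).toNat = n - k.toNat + 1 := by omega
    have hM2 : n + 1 - k.toNat = n - k.toNat + 1 := by omega
    rw [hM, hM2]
    congr 1
    refine List.countP_congr (fun j hj => ?_)
    rw [List.mem_range] at hj
    have hjk : j + k.toNat ≤ n := by omega
    have hcast : (j : Int) + k = ((j + k.toNat : Nat) : Int) := by omega
    rw [hcast, pvPspec_get cs (j + k.toNat) hjk, pvPspec_get cs j (by omega), pvWindow]
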